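-- pv_equiv track=rewrite | github.com/shepherdsm/8-Queens | queens.py | invalid_spots
-- ===== SOURCE A (Python) =====
-- import math
--
-- def invalid_spots(move, move_row, size):
--     """
--     Takes in a move, then makes a list containing all of the spots
--     that are invalidated by that move.
--
--     Returns the list of invalidated locations.
--     """
--
--     moves = []
--     col = size - int(math.log(move, 2)) - 1 # Get the column the move falls into
--     for cur_row in range(size):
--         diff = abs(cur_row - move_row)
--         if diff != 0:
--             left = right = 0
--             if col - diff >= 0:
--                 left = 2 ** (size - 1) >> (col - diff)
--             if col + diff < size:
--                 right = 1 << (size - (col + diff) - 1)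
--             moves.append(left ^ right ^ move)
--         else:
--             moves.append(move)
--
--     return moves
-- ===== SOURCE B (Python) =====
-- import math
--
-- def invalid_spots(move, move_row, size):
--     """
--     Builds the board of invalidated rows by scattering the two diagonal
--     bits outward from the queen's column, instead of recomputing a mask
--     per row.
--     """
--     lg = int(math.log(move, 2))
--     bit = 1 << lg                      # the queen's column as a single bit
--     moves = [move] * size              # every row starts with the queen's own columns
--
--     for d in range(1, size - lg):      # mirrored high diagonal: bit << d stays on the board
--         for i in (move_row - d, move_row + d):
--             if 0 <= i < size:
--                 moves[i] ^= bit << d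
--
--     for d in range(1, lg + 1):         # low diagonal: bit >> d until the bit shifts out
--         for i in (move_row - d, move_row + d):
--             if 0 <= i < size:
--                 moves[i] ^= bit >> d
--
--     return moves
-- ===== Notes on version B (the rewrite author's own statement) =====
-- stated objective: alternative
-- what changed: Instead of scanning rows and recomputing a guarded big-integer mask per row from abs(row-move_row), B prefills the board with the move and scatters the two diagonal bits outward, looping over diagonal offsets bounded by the bit positions (size-lg high, lg low) and XOR-ing one shifted bit into each mirror row.
import Mathlib
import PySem

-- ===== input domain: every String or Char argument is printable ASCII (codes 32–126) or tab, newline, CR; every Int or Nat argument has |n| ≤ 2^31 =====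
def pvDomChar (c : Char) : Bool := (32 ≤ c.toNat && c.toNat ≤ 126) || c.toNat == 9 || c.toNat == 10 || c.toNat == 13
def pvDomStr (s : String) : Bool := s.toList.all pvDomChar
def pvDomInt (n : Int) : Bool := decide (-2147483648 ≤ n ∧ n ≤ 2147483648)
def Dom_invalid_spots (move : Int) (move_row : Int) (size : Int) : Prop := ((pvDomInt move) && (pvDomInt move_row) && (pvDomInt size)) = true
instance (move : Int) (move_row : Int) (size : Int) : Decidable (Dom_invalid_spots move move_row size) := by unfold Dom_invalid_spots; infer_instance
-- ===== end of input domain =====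

-- B scatters the two shifted diagonal bits outward over a prefilled board (loops over diagonal offsets with bounded writes) instead of recomputing a guarded mask per row; objective: alternative decomposition, same return value.


-- port of int(math.log(m, 2)): exact for 1 ≤ m ≤ 2^31 (checked against CPython on that range)
def pyIntLog2 (m : Int) : Int := (Nat.log 2 m.toNat : Int)

-- ===== PORT A =====
def invalid_spots (move : Int) (move_row : Int) (size : Int) : List Int :=
  let col := size - pyIntLog2 move - 1
  (PySem.List.pyRange 0 size 1).foldl (fun moves cur_row =>
    let diff := |cur_row - move_row|
    if diff ≠ 0 then
      let left := if col - diff ≥ 0 then ((2:Int) ^ (size - 1).toNat) >>> (col - diff).toNat else 0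
      let right := if col + diff < size then (1:Int) <<< (size - (col + diff) - 1).toNat else 0
      moves ++ [PySem.Int.bxor (PySem.Int.bxor left right) move]
    else moves ++ [move]) []

-- ===== PORT B =====
def invalid_spots_alt (move : Int) (move_row : Int) (size : Int) : List Int :=
  let lg := pyIntLog2 move
  let bit := (1:Int) <<< lg.toNat
  let moves := List.replicate size.toNat move
  let moves := (PySem.List.pyRange 1 (size - lg) 1).foldl (fun ms d =>
      [move_row - d, move_row + d].foldl (fun ms i =>
        if 0 ≤ i ∧ i < size then ms.modify i.toNat (fun x => PySem.Int.bxor x (bit <<< d.toNat)) else ms) ms) moves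
  (PySem.List.pyRange 1 (lg + 1) 1).foldl (fun ms d =>
      [move_row - d, move_row + d].foldl (fun ms i =>
        if 0 ≤ i ∧ i < size then ms.modify i.toNat (fun x => PySem.Int.bxor x (bit >>> d.toNat)) else ms) ms) moves

-- ===== PRECONDITION & SPEC =====
-- Pre_ excludes exactly move ≤ 0, where math.log raises ValueError in both A and B.
def Pre_invalid_spots (move : Int) (move_row : Int) (size : Int) : Prop := 1 ≤ move
instance (move : Int) (move_row : Int) (size : Int) : Decidable (Pre_invalid_spots move move_row size) := by unfold Pre_invalid_spots; infer_instance
def pvWitness_invalid_spots : Int × Int × Int := (4, 1, 4)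

def Spec_invalid_spots (move : Int) (move_row : Int) (size : Int) (out : List Int) : Prop := out = invalid_spots_alt move move_row size
instance (move : Int) (move_row : Int) (size : Int) (out : List Int) : Decidable (Spec_invalid_spots move move_row size out) := by unfold Spec_invalid_spots; infer_instance

-- ===== CLAIM (what is proved, stated in full; the proofs are below) =====
def Claim_equal_invalid_spots : Prop := ∀ (move : Int) (move_row : Int) (size : Int), Dom_invalid_spots move move_row size → Pre_invalid_spots move move_row size → Spec_invalid_spots move move_row size (invalid_spots move move_row size)

-- ===== LEMMAS AND PROOFS =====

-- A's guarded per-row mask, and the common row value both programs produce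
def amask (move : Int) (col : Int) (size : Int) (diff : Int) : Int :=
  PySem.Int.bxor (PySem.Int.bxor
    (if col - diff ≥ 0 then ((2:Int) ^ (size - 1).toNat) >>> (col - diff).toNat else 0)
    (if col + diff < size then (1:Int) <<< (size - (col + diff) - 1).toNat else 0)) move

def gRow (move : Int) (move_row : Int) (size : Int) (r : Int) : Int :=
  if |r - move_row| ≠ 0 then amask move (size - pyIntLog2 move - 1) size |r - move_row| else move

lemma foldl_append_map (f : Int → Int) :
    ∀ (L : List Int) (acc : List Int),
      L.foldl (fun a x => a ++ [f x]) acc = acc ++ L.map f := by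
  intro L
  induction L with
  | nil => simp
  | cons x L ih => intro acc; simp [ih]

lemma A_eq_map (m mr s : Int) :
    invalid_spots m mr s = (PySem.List.pyRange 0 s 1).map (gRow m mr s) := by
  rw [← List.nil_append ((PySem.List.pyRange 0 s 1).map (gRow m mr s)), ← foldl_append_map]
  unfold invalid_spots
  exact List.foldl_ext _ _ [] (fun a r _ => by
    by_cases h : |r - mr| ≠ 0 <;> simp [gRow, amask, h])

-- effect of one bounded write 'if 0 <= i < size: moves[i] ^= v' on position i
lemma getElem?_touch (size : Int) (v : Int) (i : Nat) (hi : (i : Int) < size)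
    (ms : List Int) (j : Int) :
    ((if 0 ≤ j ∧ j < size then ms.modify j.toNat (fun x => PySem.Int.bxor x v) else ms))[i]? =
      if j = (i : Int) then (ms[i]?).map (fun x => PySem.Int.bxor x v) else ms[i]? := by
  by_cases hj : j = (i : Int)
  · subst hj
    rw [if_pos ⟨Int.natCast_nonneg i, hi⟩, if_pos rfl]
    simp [List.getElem?_modify]
  · rw [if_neg hj]
    split
    · next hg =>
      have hne : j.toNat ≠ i := by omega
      simp [List.getElem?_modify, hne]
    · rfl

-- effect of one scatter step (the two mirror writes at distance d) on position i
lemma getElem?_step (mr size : Int) (v : Int) (i : Nat) (hi : (i : Int) < size)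
    (ms : List Int) (d : Int) (hd : 1 ≤ d) :
    ([mr - d, mr + d].foldl (fun ms j =>
        if 0 ≤ j ∧ j < size then ms.modify j.toNat (fun x => PySem.Int.bxor x v) else ms) ms)[i]? =
      if |(i : Int) - mr| = d then (ms[i]?).map (fun x => PySem.Int.bxor x v) else ms[i]? := by
  simp only [List.foldl_cons, List.foldl_nil]
  rw [getElem?_touch size v i hi _ (mr + d), getElem?_touch size v i hi ms (mr - d)]
  rcases lt_trichotomy (i : Int) mr with hc | hc | hc
  · have h1 : mr + d ≠ (i : Int) := by omega
    rw [if_neg h1]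
    by_cases h2 : mr - d = (i : Int)
    · rw [if_pos h2, if_pos (by rw [abs_of_neg (by omega)]; omega)]
    · rw [if_neg h2, if_neg (by rw [abs_of_neg (by omega)]; omega)]
  · rw [if_neg (by omega), if_neg (by omega), if_neg (by rw [hc]; simp; omega)]
  · have h2 : mr - d ≠ (i : Int) := by omega
    rw [if_neg h2]
    by_cases h1 : mr + d = (i : Int)
    · rw [if_pos h1, if_pos (by rw [abs_of_pos (by omega)]; omega)]
    · rw [if_neg h1, if_neg (by rw [abs_of_pos (by omega)]; omega)]

-- effect of a whole scatter loop on position i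
lemma getElem?_scatter (mr size : Int) (v : Int → Int) (i : Nat) (hi : (i : Int) < size) :
    ∀ (L : List Int) (ms : List Int), L.Nodup → (∀ d ∈ L, 1 ≤ d) →
    (L.foldl (fun ms d => [mr - d, mr + d].foldl (fun ms j =>
        if 0 ≤ j ∧ j < size then ms.modify j.toNat (fun x => PySem.Int.bxor x (v d)) else ms) ms) ms)[i]? =
      if |(i : Int) - mr| ∈ L then (ms[i]?).map (fun x => PySem.Int.bxor x (v |(i : Int) - mr|)) else ms[i]? := by
  intro L
  induction L with
  | nil => simp
  | cons d L ih =>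
    intro ms hnd hpos
    rw [List.foldl_cons]
    beta_reduce
    rw [ih _ hnd.of_cons (fun e he => hpos e (by simp [he]))]
    by_cases hmem : |(i : Int) - mr| ∈ L
    · have hne : |(i : Int) - mr| ≠ d := fun h => (List.nodup_cons.mp hnd).1 (h ▸ hmem)
      rw [if_pos hmem, if_pos (by simp [hmem]),
          getElem?_step mr size (v d) i hi ms d (hpos d (by simp)), if_neg hne]
    · rw [if_neg hmem, getElem?_step mr size (v d) i hi ms d (hpos d (by simp))]
      by_cases hd : |(i : Int) - mr| = d
      · rw [if_pos hd, if_pos (by simp [hd]), hd]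
      · rw [if_neg hd, if_neg (by simp [hmem, hd])]

lemma length_touch (size : Int) (v : Int) (ms : List Int) (j : Int) :
    ((if 0 ≤ j ∧ j < size then ms.modify j.toNat (fun x => PySem.Int.bxor x v) else ms)).length = ms.length := by
  split <;> simp

lemma length_scatter (mr size : Int) (v : Int → Int) :
    ∀ (L : List Int) (ms : List Int),
    (L.foldl (fun ms d => [mr - d, mr + d].foldl (fun ms j =>
        if 0 ≤ j ∧ j < size then ms.modify j.toNat (fun x => PySem.Int.bxor x (v d)) else ms) ms) ms).length = ms.length := by
  intro L
  induction L with
  | nil => simp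
  | cons d L ih =>
    intro ms
    rw [List.foldl_cons]
    beta_reduce
    rw [ih]
    simp only [List.foldl_cons, List.foldl_nil]
    rw [length_touch, length_touch]

lemma bxor3_rotate (a b c : Int) (ha : 0 ≤ a) (hb : 0 ≤ b) (hc : 0 ≤ c) :
    PySem.Int.bxor (PySem.Int.bxor a b) c = PySem.Int.bxor (PySem.Int.bxor b c) a := by
  rw [PySem.Int.bxor_of_nonneg ha hb, PySem.Int.bxor_of_nonneg hb hc]
  rw [PySem.Int.bxor_of_nonneg (by positivity) hc, PySem.Int.bxor_of_nonneg (by positivity) ha]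
  simp [Nat.xor_comm, Nat.xor_assoc, Nat.xor_left_comm]

-- the high-diagonal bit: A's guarded right-shift of the top bit equals B's left-shifted column bit
lemma hi_shift_eq (lg d s : Int) (h0 : 0 ≤ lg) (hd : 1 ≤ d) (hcond : d < s - lg) :
    ((2:Int) ^ (s - 1).toNat) >>> ((s - lg - 1) - d).toNat = ((1:Int) <<< lg.toNat) <<< d.toNat := by
  rw [Int.shiftLeft_eq, Int.shiftLeft_eq, Int.shiftRight_eq_div_pow, one_mul]
  have h1 : (s - 1).toNat = ((s - lg - 1) - d).toNat + (lg.toNat + d.toNat) := by omega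
  rw [h1, pow_add]
  push_cast
  rw [mul_comm, Int.mul_ediv_cancel _ (by positivity), pow_add]

-- the low-diagonal bit: A's guarded left-shift of 1 equals B's right-shifted column bit
lemma lo_shift_eq (lg d s col : Int) (h0 : 0 ≤ lg) (hd : 1 ≤ d) (hcond : d < lg + 1)
    (hcol : col = s - lg - 1) :
    (1:Int) <<< (s - (col + d) - 1).toNat = ((1:Int) <<< lg.toNat) >>> d.toNat := by
  subst hcol
  rw [Int.shiftLeft_eq, Int.shiftLeft_eq, Int.shiftRight_eq_div_pow, one_mul, one_mul]
  have h1 : lg.toNat = (s - (s - lg - 1 + d) - 1).toNat + d.toNat := by omega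
  rw [h1, pow_add]
  push_cast
  rw [Int.mul_ediv_cancel _ (by positivity)]

lemma B_eq_map (m mr s : Int) (hm : 1 ≤ m) :
    invalid_spots_alt m mr s = (PySem.List.pyRange 0 s 1).map (gRow m mr s) := by
  unfold invalid_spots_alt
  set lg := pyIntLog2 m with hlg
  have hlg0 : 0 ≤ lg := Int.natCast_nonneg _
  set bit : Int := (1:Int) <<< lg.toNat with hbit
  have hbit0 : 0 ≤ bit := by rw [hbit, Int.shiftLeft_eq]; positivity
  apply List.ext_getElem?
  intro i
  by_cases hi : (i : Int) < s
  · have hmapi : ((PySem.List.pyRange 0 s 1).map (gRow m mr s))[i]? = some (gRow m mr s i) := by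
      rw [show s = ((s.toNat : Nat) : Int) by omega]
      exact PySem.List.getElem?_map_pyRange_zero _ s.toNat i (by omega)
    have h2 := getElem?_scatter mr s (fun d => bit >>> d.toNat) i hi
      (PySem.List.pyRange 1 (lg + 1) 1)
      ((PySem.List.pyRange 1 (s - lg) 1).foldl (fun ms d =>
        [mr - d, mr + d].foldl (fun ms j =>
          if 0 ≤ j ∧ j < s then ms.modify j.toNat (fun x => PySem.Int.bxor x (bit <<< d.toNat)) else ms) ms)
        (List.replicate s.toNat m))
      (PySem.List.nodup_pyRange_one _ _)
      (fun d hd => by rw [PySem.List.mem_pyRange_one] at hd; omega)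
    have h1 := getElem?_scatter mr s (fun d => bit <<< d.toNat) i hi
      (PySem.List.pyRange 1 (s - lg) 1) (List.replicate s.toNat m)
      (PySem.List.nodup_pyRange_one _ _)
      (fun d hd => by rw [PySem.List.mem_pyRange_one] at hd; omega)
    beta_reduce at h2 h1
    rw [hmapi, h2, h1]
    have hrep : (List.replicate s.toNat m)[i]? = some m := by
      rw [List.getElem?_replicate, if_pos (by omega)]
    rw [hrep]
    set d0 : Int := |(i : Int) - mr| with hd0
    have hd00 : 0 ≤ d0 := abs_nonneg _
    simp only [PySem.List.mem_pyRange_one, Option.map_some]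
    by_cases hz : d0 = 0
    · rw [if_neg (by omega), if_neg (by omega)]
      simp [gRow, ← hd0, hz]
    · have hgr : gRow m mr s i = amask m (s - lg - 1) s d0 := by
        simp only [gRow, ← hd0, ← hlg]
        rw [if_pos hz]
      rw [hgr]
      unfold amask
      by_cases c1 : 1 ≤ d0 ∧ d0 < s - lg
      · rw [if_pos c1]
        by_cases c2 : 1 ≤ d0 ∧ d0 < lg + 1
        · rw [if_pos c2]
          simp only [Option.map_some]
          rw [if_pos (by omega : (s - lg - 1) - d0 ≥ 0),
              if_pos (by omega : (s - lg - 1) + d0 < s),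
              hi_shift_eq lg d0 s hlg0 (by omega) (by omega),
              lo_shift_eq lg d0 s _ hlg0 (by omega) (by omega) rfl, ← hbit,
              bxor3_rotate m (bit <<< d0.toNat) (bit >>> d0.toNat) (by omega)
                (by rw [hbit, Int.shiftLeft_eq, Int.shiftLeft_eq]; positivity)
                (by rw [hbit, Int.shiftRight_eq_div_pow]; positivity)]
        · rw [if_neg c2]
          rw [if_pos (by omega : (s - lg - 1) - d0 ≥ 0),
              if_neg (by omega : ¬ ((s - lg - 1) + d0 < s)),
              hi_shift_eq lg d0 s hlg0 (by omega) (by omega), ← hbit,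
              PySem.Int.bxor_zero, PySem.Int.bxor_comm]
      · rw [if_neg c1]
        by_cases c2 : 1 ≤ d0 ∧ d0 < lg + 1
        · rw [if_pos c2]
          simp only [Option.map_some]
          rw [if_neg (by omega : ¬ ((s - lg - 1) - d0 ≥ 0)),
              if_pos (by omega : (s - lg - 1) + d0 < s),
              lo_shift_eq lg d0 s _ hlg0 (by omega) (by omega) rfl, ← hbit,
              PySem.Int.bxor_comm 0, PySem.Int.bxor_zero, PySem.Int.bxor_comm]
        · rw [if_neg c2]
          rw [if_neg (by omega : ¬ ((s - lg - 1) - d0 ≥ 0)),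
              if_neg (by omega : ¬ ((s - lg - 1) + d0 < s)),
              PySem.Int.bxor_zero, PySem.Int.bxor_comm 0, PySem.Int.bxor_zero]
  · rw [List.getElem?_eq_none, List.getElem?_eq_none]
    · simp [PySem.List.length_pyRange_one]; omega
    · rw [length_scatter, length_scatter]; simp; omega

-- ===== VERDICT (by name: the statement is the Claim_ definition above) =====
theorem invalid_spots_spec : Claim_equal_invalid_spots := by
  intro m mr s _ hm
  unfold Spec_invalid_spots
  rw [A_eq_map, B_eq_map m mr s hm]
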